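-- pv_equiv track=rewrite | github.com/qkre/Problem-Solve | PJH/programmers/120866.py | solution
-- ===== SOURCE A (Python) =====
-- def solution(board):
--     safe_area = [[True for _ in range(len(board[0]))] for _ in range(len(board))]
--
--     for y in range(len(board)):
--         for x in range(len(board[0])):
--             if board[y][x] == 1:
--                 dy, dx = [-1, -1, -1, 0, 0, 0, 1, 1, 1], [-1, 0, 1, -1, 0, 1, -1, 0, 1]
--
--                 for i in range(9):
--                     ny, nx = y + dy[i], x + dx[i]
--
--                     if 0 <= ny < len(board) and 0 <= nx < len(board[0]) and safe_area[ny][nx]: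
--                         safe_area[ny][nx] = False
--
--     answer = 0
--
--     for row in safe_area:
--         answer += row.count(True)
--
--     return answer
-- ===== SOURCE B (Python) =====
-- def solution(board):
--     h, w = len(board), len(board[0])
--     answer = 0
--     for y in range(h):
--         for x in range(w):
--             if not any(board[ny][nx] == 1
--                        for ny in range(max(y - 1, 0), min(y + 2, h))
--                        for nx in range(max(x - 1, 0), min(x + 2, w))):
--                 answer += 1
--     return answer
-- ===== Notes on version B (the rewrite author's own statement) =====
-- stated objective: simpler
-- what changed: B drops the boolean safe_area grid entirely: instead of scattering 'unsafe' marks from every threat into a matrix and counting True cells afterwards, it scans each cell's clamped 3x3 neighbourhood once and keeps only an integer counter.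
-- outside the precondition, e.g. on solution([]): A returns 0, B raises IndexError
import Mathlib
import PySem

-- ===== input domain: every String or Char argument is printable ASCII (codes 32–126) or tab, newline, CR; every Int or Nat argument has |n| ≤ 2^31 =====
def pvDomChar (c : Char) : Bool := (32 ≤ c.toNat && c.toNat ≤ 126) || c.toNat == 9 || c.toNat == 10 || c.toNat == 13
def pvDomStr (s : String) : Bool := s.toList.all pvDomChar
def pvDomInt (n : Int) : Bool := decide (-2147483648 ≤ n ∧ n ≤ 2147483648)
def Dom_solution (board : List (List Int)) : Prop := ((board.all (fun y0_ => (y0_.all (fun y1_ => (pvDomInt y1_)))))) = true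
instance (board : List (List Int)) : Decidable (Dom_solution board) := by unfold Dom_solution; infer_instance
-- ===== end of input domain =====

-- B replaces A's scatter-marked boolean grid by a direct gather scan (a clamped 3x3
-- neighbourhood check per cell) maintaining only an integer counter; no auxiliary matrix.

-- ===== PORT A =====
def solution (board : List (List Int)) : Int :=
  let h := board.length
  let w := (board.headD []).length
  let safe0 : List (List Bool) := (List.range h).map (fun _ => (List.range w).map (fun _ => true))
  let dy : List Int := [-1, -1, -1, 0, 0, 0, 1, 1, 1]
  let dx : List Int := [-1, 0, 1, -1, 0, 1, -1, 0, 1]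
  let safe := (List.range h).foldl (fun g y =>
    (List.range w).foldl (fun g x =>
      if (board.getD y []).getD x 0 = 1 then
        (List.range 9).foldl (fun g i =>
          let ny : Int := (y : Int) + dy.getD i 0
          let nx : Int := (x : Int) + dx.getD i 0
          if 0 ≤ ny ∧ ny < (h : Int) ∧ 0 ≤ nx ∧ nx < (w : Int) ∧
              (g.getD ny.toNat []).getD nx.toNat false = true then
            g.set ny.toNat ((g.getD ny.toNat []).set nx.toNat false)
          else g) g
      else g) g) safe0
  safe.foldl (fun a row => a + (row.count true : Int)) 0

-- ===== PORT B =====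
def solution_alt (board : List (List Int)) : Int :=
  let h : Int := board.length
  let w : Int := (board.headD []).length
  (PySem.List.pyRange 0 h 1).foldl (fun a y =>
    (PySem.List.pyRange 0 w 1).foldl (fun a x =>
      if (PySem.List.pyRange (max (y - 1) 0) (min (y + 2) h) 1).any (fun ny =>
            (PySem.List.pyRange (max (x - 1) 0) (min (x + 2) w) 1).any (fun nx =>
              PySem.List.pyGetD (PySem.List.pyGetD board ny []) nx 0 = 1))
      then a else a + 1) a) 0

-- ===== PRECONDITION & SPEC =====
-- Pre_ excludes boards with some row shorter than row 0, where Python A raises IndexError at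
-- board[y][x], and the empty board, a defensible corner where A's empty loops happen to return 0
-- before ever reading board[0] while B evaluates len(board[0]) first and raises IndexError.
def Pre_solution (board : List (List Int)) : Prop :=
  board ≠ [] ∧ ∀ row ∈ board, (board.headD []).length ≤ row.length
instance (board : List (List Int)) : Decidable (Pre_solution board) := by
  unfold Pre_solution; infer_instance
def pvWitness_solution : List (List Int) := [[1, 0], [0, 0]]
def Spec_solution (board : List (List Int)) (out : Int) : Prop := out = solution_alt board
instance (board : List (List Int)) (out : Int) : Decidable (Spec_solution board out) := by
  unfold Spec_solution; infer_instance

-- ===== CLAIM (what is proved, stated in full; the proofs are below) =====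
def Claim_equal_solution : Prop := ∀ (board : List (List Int)), Dom_solution board → Pre_solution board → Spec_solution board (solution board)

-- ===== LEMMAS AND PROOFS =====

-- cell lookup in a boolean grid
def pvL (g : List (List Bool)) (a b : Nat) : Bool := (g.getD a []).getD b false
-- board value at a cell (0 outside)
def pvVal (board : List (List Int)) (y x : Nat) : Int := (board.getD y []).getD x 0
-- Chebyshev-adjacency of two cells
def pvNbr (y x a b : Nat) : Bool := decide (y ≤ a + 1 ∧ a ≤ y + 1 ∧ x ≤ b + 1 ∧ b ≤ x + 1)
-- some threat cell of the board is adjacent to (a, b)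
def pvThreat (board : List (List Int)) (h w a b : Nat) : Bool :=
  (List.range h).any (fun y => (List.range w).any (fun x =>
    pvVal board y x == 1 && pvNbr y x a b))
def pvSafeB (board : List (List Int)) (h w a b : Nat) : Bool := !pvThreat board h w a b
-- grid shape
def pvShape (g : List (List Bool)) (h w : Nat) : Prop :=
  g.length = h ∧ ∀ row ∈ g, row.length = w
-- the ideal final grid
def pvG (board : List (List Int)) (h w : Nat) : List (List Bool) :=
  (List.range h).map (fun a => (List.range w).map (fun b => pvSafeB board h w a b))
-- the all-true initial grid and the list of board cells, as A builds/visits them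
def pvSafe0 (h w : Nat) : List (List Bool) :=
  (List.range h).map (fun _ => (List.range w).map (fun _ => true))
def pvPs (h w : Nat) : List (Nat × Nat) :=
  (List.range h).flatMap (fun y => (List.range w).map (fun x => (y, x)))

def pvOffs : List (Int × Int) :=
  [(-1, -1), (-1, 0), (-1, 1), (0, -1), (0, 0), (0, 1), (1, -1), (1, 0), (1, 1)]

def pvCondSet (h w : Nat) (g : List (List Bool)) (ny nx : Int) : List (List Bool) :=
  if 0 ≤ ny ∧ ny < (h : Int) ∧ 0 ≤ nx ∧ nx < (w : Int) ∧
      (g.getD ny.toNat []).getD nx.toNat false = true then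
    g.set ny.toNat ((g.getD ny.toNat []).set nx.toNat false)
  else g

def pvStep (board : List (List Int)) (h w : Nat) (g : List (List Bool)) (p : Nat × Nat) :
    List (List Bool) :=
  if (board.getD p.1 []).getD p.2 0 = 1 then
    pvOffs.foldl (fun g q => pvCondSet h w g ((p.1 : Int) + q.1) ((p.2 : Int) + q.2)) g
  else g

theorem pvShape_set {g : List (List Bool)} {h w : Nat} (hs : pvShape g h w)
    (n m : Nat) : pvShape (g.set n ((g.getD n []).set m false)) h w := by
  obtain ⟨hl, hr⟩ := hs
  by_cases hn : n < g.length
  · refine ⟨by simpa using hl, ?_⟩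
    intro row hm
    rcases List.mem_or_eq_of_mem_set hm with h1 | h1
    · exact hr _ h1
    · subst h1
      simp only [List.length_set]
      exact hr _ (by rw [List.getD_eq_getElem _ _ hn]; exact List.getElem_mem hn)
  · rw [List.set_eq_of_length_le (by omega)]; exact ⟨hl, hr⟩

theorem pvL_set {g : List (List Bool)} {h w : Nat} (hs : pvShape g h w)
    {n m a b : Nat} (hn : n < h) (hm : m < w) (ha : a < h) (hb : b < w) :
    pvL (g.set n ((g.getD n []).set m false)) a b
      = if n = a ∧ m = b then false else pvL g a b := by
  obtain ⟨hl, hr⟩ := hs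
  have hn' : n < g.length := by omega
  have ha' : a < g.length := by omega
  have hrow : (g.getD n []).length = w := by
    rw [List.getD_eq_getElem _ _ hn']; exact hr _ (List.getElem_mem hn')
  unfold pvL
  by_cases hna : n = a
  · subst hna
    have e1 : (g.set n ((g.getD n []).set m false)).getD n []
        = (g.getD n []).set m false := by
      rw [List.getD_eq_getElem _ _ (by simpa using hn'), List.getElem_set_self]
    rw [e1]
    by_cases hmb : m = b
    · rw [hmb, if_pos ⟨rfl, rfl⟩,
        List.getD_eq_getElem _ _ (show b < ((g.getD n []).set b false).length from by
          rw [List.length_set, hrow]; omega),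
        List.getElem_set_self]
    · rw [if_neg (fun hc => hmb hc.2),
        List.getD_eq_getElem _ _ (show b < ((g.getD n []).set m false).length from by
          rw [List.length_set, hrow]; omega),
        List.getElem_set_ne (by omega),
        List.getD_eq_getElem _ _ (show b < (g.getD n []).length from by rw [hrow]; omega)]
  · have e1 : (g.set n ((g.getD n []).set m false)).getD a [] = g.getD a [] := by
      rw [List.getD_eq_getElem _ _ (by simpa using ha'),
        List.getElem_set_ne (by omega), List.getD_eq_getElem _ _ ha']
    rw [e1, if_neg (fun hc => hna hc.1)]

theorem pvShape_condSet {g : List (List Bool)} {h w : Nat} (hs : pvShape g h w)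
    (ny nx : Int) : pvShape (pvCondSet h w g ny nx) h w := by
  unfold pvCondSet; split
  · exact pvShape_set hs _ _
  · exact hs

theorem pvL_condSet {g : List (List Bool)} {h w : Nat} (hs : pvShape g h w)
    {a b : Nat} (ha : a < h) (hb : b < w) (ny nx : Int) :
    pvL (pvCondSet h w g ny nx) a b
      = (pvL g a b && !decide (ny = (a : Int) ∧ nx = (b : Int))) := by
  unfold pvCondSet
  split
  · next hc =>
    obtain ⟨h1, h2, h3, h4, h5⟩ := hc
    rw [pvL_set hs (by omega) (by omega) ha hb]
    by_cases heq : ny = (a : Int) ∧ nx = (b : Int)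
    · rw [if_pos (by constructor <;> omega), decide_eq_true heq]; simp
    · rw [if_neg (by rintro ⟨e1, e2⟩; exact heq ⟨by omega, by omega⟩),
        decide_eq_false heq]; simp
  · next hc =>
    by_cases heq : ny = (a : Int) ∧ nx = (b : Int)
    · obtain ⟨e1, e2⟩ := heq
      have t1 : ny.toNat = a := by omega
      have t2 : nx.toNat = b := by omega
      cases hpv : pvL g a b
      · simp [hpv]
      · exfalso
        exact hc ⟨by omega, by omega, by omega, by omega, by
          rw [t1, t2]; exact hpv⟩
    · rw [decide_eq_false heq]; simp

theorem pvShape_foldl {β : Type} (l : List β) (F : List (List Bool) → β → List (List Bool))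
    {h w : Nat} (hF : ∀ g b, pvShape g h w → pvShape (F g b) h w)
    {g : List (List Bool)} (hs : pvShape g h w) : pvShape (l.foldl F g) h w := by
  induction l generalizing g with
  | nil => exact hs
  | cons p t ih => exact ih (hF _ _ hs)

theorem pvL_foldl_condSet (offs : List (Int × Int)) (cy cx : Int)
    {g : List (List Bool)} {h w : Nat} (hs : pvShape g h w)
    {a b : Nat} (ha : a < h) (hb : b < w) :
    pvL (offs.foldl (fun g q => pvCondSet h w g (cy + q.1) (cx + q.2)) g) a b
      = (pvL g a b && offs.all (fun q => !decide (cy + q.1 = (a : Int) ∧ cx + q.2 = (b : Int)))) := by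
  induction offs generalizing g with
  | nil => simp
  | cons p t ih =>
      rw [List.foldl_cons, ih (pvShape_condSet hs _ _), List.all_cons,
        pvL_condSet hs ha hb]
      simp [Bool.and_assoc]

theorem pvOffs_all (y x a b : Nat) :
    (pvOffs.all fun q => !decide ((y : Int) + q.1 = (a : Int) ∧ (x : Int) + q.2 = (b : Int)))
      = !pvNbr y x a b := by
  rw [Bool.eq_iff_iff]
  simp only [pvOffs, List.all_cons, List.all_nil, pvNbr, Bool.and_eq_true, Bool.and_true,
    Bool.not_eq_true', decide_eq_false_iff_not, not_and, Bool.not_eq_true, decide_eq_false_iff_not]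
  omega

theorem pvShape_step {board : List (List Int)} {h w : Nat} {g : List (List Bool)}
    (hs : pvShape g h w) (p : Nat × Nat) : pvShape (pvStep board h w g p) h w := by
  unfold pvStep; split
  · exact pvShape_foldl _ _ (fun g b hsg => pvShape_condSet hsg _ _) hs
  · exact hs

theorem pvL_step {board : List (List Int)} {h w : Nat} {g : List (List Bool)}
    (hs : pvShape g h w) {a b : Nat} (ha : a < h) (hb : b < w) (p : Nat × Nat) :
    pvL (pvStep board h w g p) a b
      = (pvL g a b && !(pvVal board p.1 p.2 == 1 && pvNbr p.1 p.2 a b)) := by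
  unfold pvStep
  split
  · next hv =>
    rw [pvL_foldl_condSet pvOffs _ _ hs ha hb, pvOffs_all]
    have : (pvVal board p.1 p.2 == 1) = true := by simpa [pvVal] using hv
    simp [this]
  · next hv =>
    have : (pvVal board p.1 p.2 == 1) = false := by simpa [pvVal] using hv
    simp [this]

theorem pvL_foldl_step (ps : List (Nat × Nat)) {board : List (List Int)} {h w : Nat}
    {g : List (List Bool)} (hs : pvShape g h w) {a b : Nat} (ha : a < h) (hb : b < w) :
    pvL (ps.foldl (pvStep board h w) g) a b
      = (pvL g a b && ps.all (fun p => !(pvVal board p.1 p.2 == 1 && pvNbr p.1 p.2 a b))) := by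
  induction ps generalizing g with
  | nil => simp
  | cons p t ih =>
      rw [List.foldl_cons, ih (pvShape_step hs p), List.all_cons, pvL_step hs ha hb]
      simp [Bool.and_assoc]

theorem pvAll_ps (board : List (List Int)) (h w a b : Nat) :
    ((pvPs h w).all fun p => !(pvVal board p.1 p.2 == 1 && pvNbr p.1 p.2 a b))
      = pvSafeB board h w a b := by
  rw [Bool.eq_iff_iff]
  simp [pvPs, pvSafeB, pvThreat, List.mem_flatMap, List.mem_map, List.mem_range]
  constructor
  · intro H y hy x hx hv
    rcases H y hy x hx with h | h
    · exact absurd hv h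
    · exact h
  · intro H y hy x hx
    by_cases hv : pvVal board y x = 1
    · exact Or.inr (H y hy x hx hv)
    · exact Or.inl hv

-- flatten a nested foldl over two ranges into one foldl over the pair list
theorem pvFoldl_nest {α β γ : Type} (l1 : List α) (l2 : List β) (F : γ → α × β → γ) (g : γ) :
    l1.foldl (fun g y => l2.foldl (fun g x => F g (y, x)) g) g
      = (l1.flatMap (fun y => l2.map (fun x => (y, x)))).foldl F g := by
  induction l1 generalizing g with
  | nil => simp
  | cons yh t ih =>
      rw [List.foldl_cons, List.flatMap_cons, List.foldl_append, List.foldl_map, ih]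

-- A's inner 9-iteration loop is the fold over the offset pairs
set_option maxHeartbeats 1000000 in
theorem pvRange9 (hN wN y x : Nat) (g : List (List Bool)) :
    (List.range 9).foldl (fun g i =>
        let ny : Int := (y : Int) + ([-1, -1, -1, 0, 0, 0, 1, 1, 1] : List Int).getD i 0
        let nx : Int := (x : Int) + ([-1, 0, 1, -1, 0, 1, -1, 0, 1] : List Int).getD i 0
        if 0 ≤ ny ∧ ny < (hN : Int) ∧ 0 ≤ nx ∧ nx < (wN : Int) ∧
            (g.getD ny.toNat []).getD nx.toNat false = true then
          g.set ny.toNat ((g.getD ny.toNat []).set nx.toNat false)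
        else g) g
      = pvOffs.foldl (fun g q => pvCondSet hN wN g ((y : Int) + q.1) ((x : Int) + q.2)) g := by
  have hoffs : pvOffs = (List.range 9).map (fun i =>
      (([-1, -1, -1, 0, 0, 0, 1, 1, 1] : List Int).getD i 0,
       ([-1, 0, 1, -1, 0, 1, -1, 0, 1] : List Int).getD i 0)) := by decide
  rw [hoffs, List.foldl_map]
  rfl

theorem pvStep_eq (board : List (List Int)) (h w : Nat) (g : List (List Bool)) (y x : Nat) :
    pvStep board h w g (y, x)
      = if (board.getD y []).getD x 0 = 1 then
          pvOffs.foldl (fun g q => pvCondSet h w g ((y : Int) + q.1) ((x : Int) + q.2)) g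
        else g := rfl

theorem pvShape_safe0 (h w : Nat) : pvShape (pvSafe0 h w) h w := by
  refine ⟨by simp [pvSafe0], ?_⟩
  intro row hr
  simp only [pvSafe0, List.mem_map] at hr
  obtain ⟨_, _, rfl⟩ := hr
  simp

theorem pvL_safe0 {h w a b : Nat} (ha : a < h) (hb : b < w) : pvL (pvSafe0 h w) a b = true := by
  simp [pvL, pvSafe0, List.getD_eq_getElem?_getD, ha, hb]

theorem pvGrid_eq (board : List (List Int)) (h w : Nat) :
    (pvPs h w).foldl (pvStep board h w) (pvSafe0 h w) = pvG board h w := by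
  have hsG : pvShape ((pvPs h w).foldl (pvStep board h w) (pvSafe0 h w)) h w :=
    pvShape_foldl _ _ (fun g p hsg => pvShape_step hsg p) (pvShape_safe0 h w)
  apply List.ext_getElem
  · simp [pvG, hsG.1]
  intro a ha1 ha2
  have ha : a < h := by have := hsG.1; omega
  have hrow : (((pvPs h w).foldl (pvStep board h w) (pvSafe0 h w))[a]).length = w :=
    hsG.2 _ (List.getElem_mem ha1)
  apply List.ext_getElem
  · simp [pvG, hrow, List.getElem_map, List.getElem_range]
  intro b hb1 hb2
  have hb : b < w := by omega
  have eL : (((pvPs h w).foldl (pvStep board h w) (pvSafe0 h w))[a])[b]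
      = pvL ((pvPs h w).foldl (pvStep board h w) (pvSafe0 h w)) a b := by
    unfold pvL
    rw [List.getD_eq_getElem _ _ ha1, List.getD_eq_getElem _ _ hb1]
  rw [eL, pvL_foldl_step _ (pvShape_safe0 h w) ha hb, pvL_safe0 ha hb, Bool.true_and,
    pvAll_ps]
  simp [pvG, List.getElem_map, List.getElem_range, ha, hb]

theorem pvCount_map {α : Type} (l : List α) (f : α → Bool) :
    (l.map f).count true = l.countP f := by
  induction l with
  | nil => simp
  | cons x t ih =>
      simp only [List.map_cons, List.count_cons, List.countP_cons, ih]
      cases hx : f x <;> simp [hx]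

-- A's marking double loop produces exactly the ideal grid
theorem pvA_fold (board : List (List Int)) :
    (List.range board.length).foldl
      ((fun (g : List (List Bool)) (y : Nat) =>
      (List.range (board.headD []).length).foldl (fun g x =>
        if (board.getD y []).getD x 0 = 1 then
          (List.range 9).foldl (fun g i =>
            let ny : Int := (y : Int) + ([-1, -1, -1, 0, 0, 0, 1, 1, 1] : List Int).getD i 0
            let nx : Int := (x : Int) + ([-1, 0, 1, -1, 0, 1, -1, 0, 1] : List Int).getD i 0
            if 0 ≤ ny ∧ ny < ((board.length : Nat) : Int) ∧ 0 ≤ nx ∧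
                nx < (((board.headD []).length : Nat) : Int) ∧
                (g.getD ny.toNat []).getD nx.toNat false = true then
              g.set ny.toNat ((g.getD ny.toNat []).set nx.toNat false)
            else g) g
        else g) g))
      (pvSafe0 board.length (board.headD []).length)
      = pvG board board.length (board.headD []).length := by
  have h1 : (fun (g : List (List Bool)) (y : Nat) =>
      (List.range (board.headD []).length).foldl (fun g x =>
        if (board.getD y []).getD x 0 = 1 then
          (List.range 9).foldl (fun g i =>
            let ny : Int := (y : Int) + ([-1, -1, -1, 0, 0, 0, 1, 1, 1] : List Int).getD i 0
            let nx : Int := (x : Int) + ([-1, 0, 1, -1, 0, 1, -1, 0, 1] : List Int).getD i 0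
            if 0 ≤ ny ∧ ny < ((board.length : Nat) : Int) ∧ 0 ≤ nx ∧
                nx < (((board.headD []).length : Nat) : Int) ∧
                (g.getD ny.toNat []).getD nx.toNat false = true then
              g.set ny.toNat ((g.getD ny.toNat []).set nx.toNat false)
            else g) g
        else g) g)
      = (fun (g : List (List Bool)) (y : Nat) =>
          (List.range (board.headD []).length).foldl (fun g x =>
            pvStep board board.length (board.headD []).length g (y, x)) g) := by
    funext g y
    refine congrArg (fun f => List.foldl f g (List.range (board.headD []).length)) ?_
    funext g x
    rw [pvStep_eq, ← pvRange9]
  calc (List.range board.length).foldl _ (pvSafe0 board.length (board.headD []).length)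
      = (List.range board.length).foldl
          (fun (g : List (List Bool)) (y : Nat) =>
            (List.range (board.headD []).length).foldl (fun g x =>
              pvStep board board.length (board.headD []).length g (y, x)) g)
          (pvSafe0 board.length (board.headD []).length) :=
        congrArg (fun f => List.foldl f (pvSafe0 board.length (board.headD []).length)
          (List.range board.length)) h1
    _ = (pvPs board.length (board.headD []).length).foldl
          (pvStep board board.length (board.headD []).length)
          (pvSafe0 board.length (board.headD []).length) :=
        pvFoldl_nest (List.range board.length) (List.range (board.headD []).length)
          (pvStep board board.length (board.headD []).length)
          (pvSafe0 board.length (board.headD []).length)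
    _ = pvG board board.length (board.headD []).length :=
        pvGrid_eq board board.length (board.headD []).length

-- A computes, for each row index, the number of safe cells of that row
theorem pvA_eq (board : List (List Int)) :
    solution board
      = ((List.range board.length).map (fun a =>
          (((List.range (board.headD []).length).countP
            (fun b => pvSafeB board board.length (board.headD []).length a b)) : Int))).sum := by
  have e : solution board
      = ((List.range board.length).foldl
          ((fun (g : List (List Bool)) (y : Nat) =>
      (List.range (board.headD []).length).foldl (fun g x =>
        if (board.getD y []).getD x 0 = 1 then
          (List.range 9).foldl (fun g i =>
            let ny : Int := (y : Int) + ([-1, -1, -1, 0, 0, 0, 1, 1, 1] : List Int).getD i 0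
            let nx : Int := (x : Int) + ([-1, 0, 1, -1, 0, 1, -1, 0, 1] : List Int).getD i 0
            if 0 ≤ ny ∧ ny < ((board.length : Nat) : Int) ∧ 0 ≤ nx ∧
                nx < (((board.headD []).length : Nat) : Int) ∧
                (g.getD ny.toNat []).getD nx.toNat false = true then
              g.set ny.toNat ((g.getD ny.toNat []).set nx.toNat false)
            else g) g
        else g) g))
          (pvSafe0 board.length (board.headD []).length)).foldl
            (fun a row => a + (row.count true : Int)) 0 := rfl
  rw [e, pvA_fold]
  simp only [PySem.List.foldl_add, zero_add]
  simp only [pvG, List.map_map, Function.comp_def, pvCount_map]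

-- total pyGetD at a nonnegative index is getD at its toNat
theorem pvPyGetD {α : Type} (l : List α) (i : Int) (hi : 0 ≤ i) (d : α) :
    PySem.List.pyGetD l i d = l.getD i.toNat d := by
  obtain ⟨n, rfl⟩ : ∃ n : Nat, i = (n : Int) := ⟨i.toNat, by omega⟩
  rw [PySem.List.pyGetD_natCast]
  simp

-- B's neighbourhood test agrees with pvThreat
theorem pvCond_eq (board : List (List Int)) (a b : Nat)
    (ha : a < board.length) (hb : b < (board.headD []).length) :
    ((PySem.List.pyRange (max ((a : Int) - 1) 0) (min ((a : Int) + 2) (board.length : Int)) 1).any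
      (fun ny =>
        (PySem.List.pyRange (max ((b : Int) - 1) 0)
            (min ((b : Int) + 2) ((board.headD []).length : Int)) 1).any (fun nx =>
          decide (PySem.List.pyGetD (PySem.List.pyGetD board ny []) nx 0 = 1))))
      = pvThreat board board.length (board.headD []).length a b := by
  rw [Bool.eq_iff_iff]
  simp only [List.any_eq_true, PySem.List.mem_pyRange_one, pvThreat, pvVal, pvNbr,
    List.mem_range, decide_eq_true_eq, Bool.and_eq_true, beq_iff_eq]
  constructor
  · rintro ⟨ny, ⟨hy1, hy2⟩, nx, ⟨hx1, hx2⟩, hval⟩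
    have hy0 : 0 ≤ ny := le_trans (le_max_right _ _) hy1
    have hx0 : 0 ≤ nx := le_trans (le_max_right _ _) hx1
    rw [pvPyGetD _ _ hy0, pvPyGetD _ _ hx0] at hval
    exact ⟨ny.toNat, by omega, ⟨nx.toNat, by omega, hval, by omega⟩⟩
  · rintro ⟨y, hy, x, hx, hval, hnbr⟩
    refine ⟨(y : Int), ⟨by omega, by omega⟩, (x : Int), ⟨by omega, by omega⟩, ?_⟩
    rw [PySem.List.pyGetD_natCast, PySem.List.pyGetD_natCast]
    exact hval

-- inner counting loop of B
theorem pvFoldl_count {α : Type} (l : List α) (p : α → Bool) (a : Int) :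
    l.foldl (fun a x => if p x then a else a + 1) a
      = a + ((l.countP (fun x => !p x) : Nat) : Int) := by
  induction l generalizing a with
  | nil => simp
  | cons x t ih =>
      rw [List.foldl_cons]
      cases hx : p x <;> simp [hx, ih, List.countP_cons] <;> push_cast <;> ring

theorem pvB_eq (board : List (List Int)) :
    solution_alt board
      = ((List.range board.length).map (fun (a : Nat) =>
          (((List.range (board.headD []).length).countP (fun (b : Nat) =>
            !((PySem.List.pyRange (max ((a : Int) - 1) 0)
                (min ((a : Int) + 2) (board.length : Int)) 1).any (fun ny =>
              (PySem.List.pyRange (max ((b : Int) - 1) 0)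
                  (min ((b : Int) + 2) ((board.headD []).length : Int)) 1).any (fun nx =>
                decide (PySem.List.pyGetD (PySem.List.pyGetD board ny []) nx 0 = 1)))))) : Int))).sum := by
  have e : solution_alt board
      = (PySem.List.pyRange 0 ((board.length : Nat) : Int) 1).foldl (fun a y =>
          (PySem.List.pyRange 0 (((board.headD []).length : Nat) : Int) 1).foldl (fun a x =>
            if (PySem.List.pyRange (max (y - 1) 0)
                  (min (y + 2) ((board.length : Nat) : Int)) 1).any (fun ny =>
                  (PySem.List.pyRange (max (x - 1) 0)
                      (min (x + 2) (((board.headD []).length : Nat) : Int)) 1).any (fun nx =>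
                    PySem.List.pyGetD (PySem.List.pyGetD board ny []) nx 0 = 1))
            then a else a + 1) a) 0 := rfl
  rw [e]
  rw [PySem.List.pyRange_zero_natCast, PySem.List.pyRange_zero_natCast]
  simp only [List.foldl_map]
  simp only [pvFoldl_count]
  simp only [PySem.List.foldl_add, zero_add]

-- ===== VERDICT (by name: the statement is the Claim_ definition above) =====
theorem solution_spec : Claim_equal_solution := by
  intro board _ _
  unfold Spec_solution
  rw [pvA_eq, pvB_eq]
  congr 1
  apply List.map_congr_left
  intro a hma
  rw [List.mem_range] at hma
  congr 1
  apply List.countP_congr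
  intro b hmb
  rw [List.mem_range] at hmb
  simp only [pvSafeB]
  rw [pvCond_eq board a b hma hmb]
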